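-- pv_equiv track=rewrite | github.com/pypi-data/pypi-mirror-290 | packages/voxylstats/voxylstats-1.5.0.tar.gz/voxylstats-1.5.0/voxyl/models/utils.py | calculate_total_stats
-- ===== SOURCE A (Python) =====
-- def calculate_total_stats(data: dict):
--     if not data:
--         return {"wins": 0, "finals": 0, "kills": 0, "beds": 0}
--
--     wins = 0
--     finals = 0
--     kills = 0
--     beds = 0
--     for i in data:
--         try:
--             wins += data[i]["wins"]
--
--         except:
--             pass
--
--         try:
--             finals += data[i]["finals"]
--
--         except:
--             pass
--
--         try:
--             kills += data[i]["kills"]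
--
--         except:
--             pass
--
--         try:
--             beds += data[i]["beds"]
--
--         except:
--             pass
--
--     return {"wins": wins, "finals": finals, "kills": kills, "beds": beds}
-- ===== SOURCE B (Python) =====
-- def sum_stat(data, key):
--     total = 0
--     for i in data:
--         try:
--             total += data[i][key]
--         except:
--             pass
--     return total
--
--
-- def calculate_total_stats(data: dict):
--     return {k: sum_stat(data, k) for k in ("wins", "finals", "kills", "beds")}
-- ===== Notes on version B (the rewrite author's own statement) =====
-- stated objective: alternative
-- what changed: One element-outer pass accumulating four counters is replaced by a per-stat helper that sums a single key, run once per stat in a dict comprehension (four independent key-outer passes).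
import Mathlib
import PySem

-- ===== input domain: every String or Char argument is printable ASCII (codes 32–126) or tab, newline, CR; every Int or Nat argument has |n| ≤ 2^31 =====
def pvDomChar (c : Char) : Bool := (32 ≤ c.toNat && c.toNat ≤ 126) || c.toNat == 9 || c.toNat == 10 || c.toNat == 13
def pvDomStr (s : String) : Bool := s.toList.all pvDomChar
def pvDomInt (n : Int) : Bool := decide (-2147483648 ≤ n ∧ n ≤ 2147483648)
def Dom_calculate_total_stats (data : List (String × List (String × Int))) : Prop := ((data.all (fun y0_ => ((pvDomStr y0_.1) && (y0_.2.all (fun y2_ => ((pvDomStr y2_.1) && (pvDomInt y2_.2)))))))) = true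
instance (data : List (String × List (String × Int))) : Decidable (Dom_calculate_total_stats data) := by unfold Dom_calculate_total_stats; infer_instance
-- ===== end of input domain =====

-- B replaces A's single pass accumulating four counters by a per-stat helper summed once per key; alternative decomposition, same cost.


-- ===== PORT A =====
-- one guarded access `try: acc += data[i][key] except: pass` (shared by both ports: each Python contains this exact statement)
def tryAddStat (d : PySem.Dict String (List (String × Int))) (key : String) (i : String) (acc : Int) : Int :=
  match d.get? i with
  | none => acc
  | some inner =>
    match (PySem.Dict.ofList inner).get? key with
    | none => acc
    | some v => acc + v

def calculate_total_stats (data : List (String × List (String × Int))) : List (String × Int) :=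
  if data.isEmpty then [("wins", 0), ("finals", 0), ("kills", 0), ("beds", 0)]
  else
    let d := PySem.Dict.ofList data
    let st := d.keys.foldl (fun (acc : Int × Int × Int × Int) i =>
      let wins := tryAddStat d "wins" i acc.1
      let finals := tryAddStat d "finals" i acc.2.1
      let kills := tryAddStat d "kills" i acc.2.2.1
      let beds := tryAddStat d "beds" i acc.2.2.2
      (wins, finals, kills, beds)) (0, 0, 0, 0)
    [("wins", st.1), ("finals", st.2.1), ("kills", st.2.2.1), ("beds", st.2.2.2)]

-- ===== PORT B =====
def sum_stat (data : List (String × List (String × Int))) (key : String) : Int :=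
  let d := PySem.Dict.ofList data
  d.keys.foldl (fun total i => tryAddStat d key i total) 0

def calculate_total_stats_alt (data : List (String × List (String × Int))) : List (String × Int) :=
  (["wins", "finals", "kills", "beds"]).map (fun k => (k, sum_stat data k))

-- ===== PRECONDITION & SPEC =====
def Spec_calculate_total_stats (data : List (String × List (String × Int))) (out : List (String × Int)) : Prop := out = calculate_total_stats_alt data
instance (data : List (String × List (String × Int))) (out : List (String × Int)) : Decidable (Spec_calculate_total_stats data out) := by unfold Spec_calculate_total_stats; infer_instance

-- ===== CLAIM (what is proved, stated in full; the proofs are below) =====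
def Claim_equal_calculate_total_stats : Prop := ∀ (data : List (String × List (String × Int))), Dom_calculate_total_stats data → Spec_calculate_total_stats data (calculate_total_stats data)

-- ===== LEMMAS AND PROOFS =====

-- value of one guarded access, isolated from its accumulator
def statVal (d : PySem.Dict String (List (String × Int))) (key : String) (i : String) : Int :=
  ((d.get? i).bind (fun inner => (PySem.Dict.ofList inner).get? key)).getD 0

theorem tryAddStat_eq (d : PySem.Dict String (List (String × Int))) (key i : String) (acc : Int) :
    tryAddStat d key i acc = acc + statVal d key i := by
  unfold tryAddStat statVal
  cases h : d.get? i with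
  | none => simp [h]
  | some inner =>
    cases h2 : (PySem.Dict.ofList inner).get? key with
    | none => simp [h2]
    | some v => simp [h2]

-- a single-stat fold shifts its accumulator out front
theorem foldl_tryAddStat_shift (d : PySem.Dict String (List (String × Int))) (key : String) :
    ∀ (ks : List String) (t : Int),
      ks.foldl (fun total i => tryAddStat d key i total) t
        = t + ks.foldl (fun total i => tryAddStat d key i total) 0 := by
  intro ks
  induction ks with
  | nil => intro t; simp
  | cons i ks ih =>
    intro t
    simp only [List.foldl_cons]
    rw [ih (tryAddStat d key i t), ih (tryAddStat d key i 0), tryAddStat_eq, tryAddStat_eq]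
    ring

-- A's four-counter fold is the four independent single-stat folds
theorem foldl_four_split (d : PySem.Dict String (List (String × Int))) :
    ∀ (ks : List String) (w f k b : Int),
      ks.foldl (fun (acc : Int × Int × Int × Int) i =>
          let wins := tryAddStat d "wins" i acc.1
          let finals := tryAddStat d "finals" i acc.2.1
          let kills := tryAddStat d "kills" i acc.2.2.1
          let beds := tryAddStat d "beds" i acc.2.2.2
          (wins, finals, kills, beds)) (w, f, k, b)
        = (w + ks.foldl (fun t i => tryAddStat d "wins" i t) 0,
           f + ks.foldl (fun t i => tryAddStat d "finals" i t) 0,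
           k + ks.foldl (fun t i => tryAddStat d "kills" i t) 0,
           b + ks.foldl (fun t i => tryAddStat d "beds" i t) 0) := by
  intro ks
  induction ks with
  | nil => intro w f k b; simp
  | cons i ks ih =>
    intro w f k b
    simp only [List.foldl_cons]
    rw [ih]
    rw [foldl_tryAddStat_shift d "wins" ks (tryAddStat d "wins" i 0),
        foldl_tryAddStat_shift d "finals" ks (tryAddStat d "finals" i 0),
        foldl_tryAddStat_shift d "kills" ks (tryAddStat d "kills" i 0),
        foldl_tryAddStat_shift d "beds" ks (tryAddStat d "beds" i 0)]
    simp only [tryAddStat_eq]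
    refine Prod.ext ?_ (Prod.ext ?_ (Prod.ext ?_ ?_)) <;> simp <;> ring

-- ===== VERDICT (by name: the statement is the Claim_ definition above) =====
theorem calculate_total_stats_spec : Claim_equal_calculate_total_stats := by
  intro data _
  unfold Spec_calculate_total_stats calculate_total_stats calculate_total_stats_alt sum_stat
  by_cases h : data.isEmpty
  · have : data = [] := by cases data <;> simp_all
    subst this
    decide
  · simp only [h]
    rw [foldl_four_split]
    simp
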